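-- pv_equiv track=rewrite | github.com/peteromallet/desloppify | desloppify/languages/python/detectors/layer_violation.py | _source_package_for_file
-- ===== SOURCE A (Python) =====
-- from collections.abc import Sequence
--
-- def _source_matches_file(filepath: str, source: str) -> bool:
--     """Component-aware source path match."""
--     file_parts = [p for p in filepath.replace("\\", "/").split("/") if p]
--     source_parts = [p for p in source.strip("/").split("/") if p]
--     if not file_parts or not source_parts:
--         return False
--     width = len(source_parts)
--     for idx in range(len(file_parts) - width + 1):
--         if file_parts[idx : idx + width] == source_parts:
--             return True
--     return False
--
-- def _source_package_for_file(
--     filepath: str,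
--     rules: Sequence[tuple[str, str, str]],
-- ) -> str:
--     for source, _, _ in rules:
--         if _source_matches_file(filepath, source):
--             return source.rstrip("/").split("/")[-1]
--     return ""
-- ===== SOURCE B (Python) =====
-- def _source_package_for_file(filepath, rules):
--     # One normalized haystack string with sentinel slashes; each rule becomes a
--     # delimiter-bounded substring test instead of a sliding-window slice scan.
--     fp = "/" + "/".join(p for p in filepath.replace("\\", "/").split("/") if p) + "/"
--     for source, _, _ in rules:
--         source_parts = [p for p in source.strip("/").split("/") if p]
--         if source_parts and "/" + "/".join(source_parts) + "/" in fp: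
--             return source.rstrip("/").split("/")[-1]
--     return ""
-- ===== Notes on version B (the rewrite author's own statement) =====
-- stated objective: simpler
-- what changed: The sliding-window helper that compares every width-sized slice of the file's path components is replaced by a single delimiter-bounded substring test: both paths are joined with '/' and wrapped in sentinel slashes once, so each rule is one 'in' check on a precomputed haystack string instead of a nested index loop with slice comparisons.
import Mathlib
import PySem

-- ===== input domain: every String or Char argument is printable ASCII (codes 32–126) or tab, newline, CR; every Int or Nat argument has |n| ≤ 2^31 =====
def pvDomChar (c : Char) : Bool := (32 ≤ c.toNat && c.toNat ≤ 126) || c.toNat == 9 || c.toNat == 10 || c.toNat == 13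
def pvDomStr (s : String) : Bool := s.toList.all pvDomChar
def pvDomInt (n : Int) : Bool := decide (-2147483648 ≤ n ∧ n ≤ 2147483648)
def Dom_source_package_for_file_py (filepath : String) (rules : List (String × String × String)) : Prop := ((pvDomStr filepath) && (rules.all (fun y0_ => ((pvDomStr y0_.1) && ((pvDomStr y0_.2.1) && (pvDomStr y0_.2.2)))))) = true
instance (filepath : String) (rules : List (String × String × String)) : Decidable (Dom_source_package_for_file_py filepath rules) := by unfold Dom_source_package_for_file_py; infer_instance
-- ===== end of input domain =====

-- B replaces A's sliding-window slice scan with one delimiter-bounded substring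
-- test on '/'-joined normalized paths (objective: simpler).

-- ===== PORT A =====
-- source.rstrip("/") — ported by hand (PySem has no rstrip-with-chars): exact,
-- drops exactly the trailing '/' characters.
def pvRstripSlash (s : String) : String :=
  String.ofList ((s.toList.reverse.dropWhile (fun c => c == '/')).reverse)

-- the identical Python line 'source.rstrip("/").split("/")[-1]' appearing in both A and B
-- (split on a non-empty separator never yields none, and always at least one piece, so getD is never used)
def pvLastComp (source : String) : String :=
  (PySem.List.pyGet? ((PySem.Str.split? (pvRstripSlash source) "/").getD []) (-1)).getD ""

-- 'for idx in range(...): if file_parts[idx:idx+width] == source_parts: return True'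
def pvALoop (file_parts source_parts : List String) (width : Int) : List Int → Bool
  | [] => false
  | idx :: rest =>
    if PySem.List.slice file_parts (some idx) (some (idx + width)) == source_parts then true
    else pvALoop file_parts source_parts width rest

def pvSourceMatchesFile (filepath source : String) : Bool :=
  let file_parts := ((PySem.Str.split? (PySem.Str.replace filepath "\\" "/") "/").getD []).filter (fun p => !(p == ""))
  let source_parts := ((PySem.Str.split? (PySem.Str.stripChars source "/") "/").getD []).filter (fun p => !(p == ""))
  if file_parts.isEmpty || source_parts.isEmpty then false
  else
    let width : Int := (source_parts.length : Int)
    pvALoop file_parts source_parts width (PySem.List.pyRange 0 ((file_parts.length : Int) - width + 1) 1)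

def pvAGo (filepath : String) : List (String × String × String) → String
  | [] => ""
  | (source, _, _) :: rest =>
    if pvSourceMatchesFile filepath source then pvLastComp source else pvAGo filepath rest

def source_package_for_file_py (filepath : String) (rules : List (String × String × String)) : String :=
  pvAGo filepath rules

-- ===== PORT B =====
def pvBGo (fp : String) : List (String × String × String) → String
  | [] => ""
  | (source, _, _) :: rest =>
    let source_parts := ((PySem.Str.split? (PySem.Str.stripChars source "/") "/").getD []).filter (fun p => !(p == ""))
    if (!source_parts.isEmpty) && PySem.Str.isIn ("/" ++ PySem.Str.join "/" source_parts ++ "/") fp then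
      pvLastComp source
    else pvBGo fp rest

def source_package_for_file_py_alt (filepath : String) (rules : List (String × String × String)) : String :=
  let fp := "/" ++ PySem.Str.join "/" (((PySem.Str.split? (PySem.Str.replace filepath "\\" "/") "/").getD []).filter (fun p => !(p == ""))) ++ "/"
  pvBGo fp rules

-- ===== PRECONDITION & SPEC =====
def Spec_source_package_for_file_py (filepath : String) (rules : List (String × String × String)) (out : String) : Prop := out = source_package_for_file_py_alt filepath rules
instance (filepath : String) (rules : List (String × String × String)) (out : String) : Decidable (Spec_source_package_for_file_py filepath rules out) := by unfold Spec_source_package_for_file_py; infer_instance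

-- ===== CLAIM (what is proved, stated in full; the proofs are below) =====
def Claim_equal_source_package_for_file_py : Prop := ∀ (filepath : String) (rules : List (String × String × String)), Dom_source_package_for_file_py filepath rules → Spec_source_package_for_file_py filepath rules (source_package_for_file_py filepath rules)

-- ===== LEMMAS AND PROOFS =====

-- PySem's splitOn on separator "/" is Lean's splitOnP (· == '/')
theorem pv_go_eq (l : List Char) : ∀ (fuel : Nat) (cur : List Char) (acc : List (List Char)),
    l.length ≤ fuel →
    PySem.Chars.splitOn.go ['/'] fuel l cur acc
      = acc.reverse ++ (List.splitOnP (fun c => c == '/') l).modifyHead (fun x => cur.reverse ++ x) := by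
  induction l with
  | nil =>
    intro fuel cur acc _
    cases fuel <;> simp [PySem.Chars.splitOn.go]
  | cons c rest ih =>
    intro fuel cur acc hlen
    cases fuel with
    | zero => simp at hlen
    | succ n =>
      rw [PySem.Chars.splitOn.go.eq_def]
      simp only [List.isPrefixOf, List.length_cons] at *
      by_cases hc : c = '/'
      · subst hc
        simp only [BEq.rfl, Bool.true_and, if_pos]
        rw [show List.drop ([].length + 1) ('/' :: rest) = rest from rfl]
        rw [ih n [] (cur.reverse :: acc) (by omega)]
        rw [List.splitOnP_cons]
        simp only [BEq.rfl, if_pos]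
        cases h : List.splitOnP (fun c => c == '/') rest <;> simp
      · have hbeq : (('/' == c) && List.isPrefixOf [] rest) = false := by
          simp [BEq.beq]; exact fun h => hc h.symm
        rw [if_neg (by simp_all)]
        rw [ih n (c :: cur) acc (by omega)]
        have : (List.splitOnP (fun c => c == '/') (c :: rest))
            = (List.splitOnP (fun c => c == '/') rest).modifyHead (List.cons c) := by
          rw [List.splitOnP_cons]; simp [hc]
        rw [this, List.modifyHead_modifyHead]
        cases h : List.splitOnP (fun c => c == '/') rest <;> simp

theorem pv_splitOn_eq (s : List Char) :
    PySem.Chars.splitOn s ['/'] = List.splitOnP (fun c => c == '/') s := by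
  rw [PySem.Chars.splitOn.eq_def, pv_go_eq s (s.length + 1) [] [] (by omega)]
  cases h : List.splitOnP (fun c => c == '/') s <;> simp

theorem pv_splitOnP_no_slash (l : List Char) :
    ∀ x ∈ List.splitOnP (fun c => c == '/') l, '/' ∉ x := by
  induction l with
  | nil => simp
  | cons c rest ih =>
    rw [List.splitOnP_cons]
    by_cases hc : c = '/'
    · subst hc; simp only [BEq.rfl, if_pos]
      intro x hx
      rcases List.mem_cons.1 hx with h | h
      · simp [h]
      · exact ih x h
    · rw [if_neg (by simp [hc])]
      obtain ⟨y, ys, hy⟩ := List.exists_cons_of_ne_nil (List.splitOnP_ne_nil (fun c => c == '/') rest)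
      rw [hy]
      intro x hx
      rcases List.mem_cons.1 hx with h | h
      · subst h
        intro hmem
        rcases List.mem_cons.1 hmem with h | h
        · exact hc h.symm
        · exact ih y (hy ▸ List.mem_cons_self) h
      · exact ih x (hy ▸ List.mem_cons_of_mem y h)

-- the char-level filtered parts
def pvPartsC (s : List Char) : List (List Char) :=
  (List.splitOnP (fun c => c == '/') s).filter (fun p => !p.isEmpty)

theorem pv_parts_toList (s : String) :
    (((PySem.Str.split? s "/").getD []).filter (fun p => !(p == ""))).map String.toList
      = pvPartsC s.toList := by
  have hbeq : ∀ p : String, (!(p == "")) = !(p.toList.isEmpty) := by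
    intro p
    congr 1
    rw [Bool.eq_iff_iff, beq_iff_eq, List.isEmpty_iff, ← String.toList_inj]
    exact Iff.rfl
  have h := PySem.Str.split?_map s "/"
  cases hs : PySem.Str.split? s "/" with
  | none =>
    rw [hs] at h
    simp [PySem.Chars.split?, show ("/" : String).toList = ['/'] from rfl] at h
  | some l =>
    rw [hs] at h
    simp only [Option.map_some, PySem.Chars.split?,
      show ("/" : String).toList = ['/'] from rfl, List.isEmpty_cons] at h
    replace h : List.map String.toList l = PySem.Chars.splitOn s.toList ['/'] := by
      simpa using h
    unfold pvPartsC
    rw [← pv_splitOn_eq, ← h, List.filter_map]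
    simp only [Option.getD_some, Function.comp_def]
    congr 1
    apply List.filter_congr
    intro p _
    rw [hbeq]

theorem pv_parts_valid (s : List Char) : ∀ p ∈ pvPartsC s, p ≠ [] ∧ '/' ∉ p := by
  intro p hp
  rw [pvPartsC, List.mem_filter] at hp
  refine ⟨?_, pv_splitOnP_no_slash s p hp.1⟩
  have := hp.2
  simpa [List.isEmpty_iff] using this

-- '/' :: p₁ ++ '/' :: p₂ ++ … ++ '/' — the slash-bounded join
def pvPJ (ps : List (List Char)) : List Char := (ps.map (fun p => '/' :: p)).flatten

def pvG (ps : List (List Char)) : List Char := pvPJ ps ++ ['/']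

theorem pvPJ_append (a b : List (List Char)) : pvPJ (a ++ b) = pvPJ a ++ pvPJ b := by
  simp [pvPJ]

theorem pvG_nil : pvG [] = ['/'] := rfl

theorem pvG_cons (p : List Char) (ps : List (List Char)) : pvG (p :: ps) = '/' :: (p ++ pvG ps) := by
  simp [pvG, pvPJ]

theorem pvG_head (ps : List (List Char)) : ∃ t, pvG ps = '/' :: t := by
  cases ps with
  | nil => exact ⟨[], rfl⟩
  | cons p ps => exact ⟨p ++ pvG ps, pvG_cons p ps⟩

theorem pvG_length_pos (ps : List (List Char)) : 1 ≤ (pvG ps).length := by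
  obtain ⟨t, h⟩ := pvG_head ps; simp [h]

theorem pvG_length3 {ps : List (List Char)} (hv : ∀ q ∈ ps, q ≠ [] ∧ '/' ∉ q) (h : ps ≠ []) :
    3 ≤ (pvG ps).length := by
  cases ps with
  | nil => exact absurd rfl h
  | cons a t =>
    have ha : a ≠ [] := (hv a List.mem_cons_self).1
    have : 1 ≤ a.length := by
      cases a with
      | nil => exact absurd rfl ha
      | cons _ _ => simp
    have := pvG_length_pos t
    rw [pvG_cons]
    simp only [List.length_cons, List.length_append]
    omega

theorem pv_intercalate_g (ps : List (List Char)) (h : ps ≠ []) :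
    '/' :: (List.intercalate ['/'] ps ++ ['/']) = pvG ps := by
  induction ps with
  | nil => exact absurd rfl h
  | cons a t ih =>
    cases t with
    | nil => simp [List.intercalate, pvG, pvPJ]
    | cons b t' =>
      rw [pvG_cons]
      rw [show List.intercalate ['/'] (a :: b :: t') = a ++ '/' :: List.intercalate ['/'] (b :: t') from by
        simp [List.intercalate, List.intersperse_cons₂]]
      rw [← ih (by simp)]
      simp

-- prefix step: with '/'-free s p and x y starting with '/', s++x <+: p++y forces s = p
theorem pvQ {s p x y : List Char} (hs : '/' ∉ s) (hp : '/' ∉ p)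
    (hx : ∃ t, x = '/' :: t) (hy : ∃ t, y = '/' :: t)
    (h : s ++ x <+: p ++ y) : s = p ∧ x <+: y := by
  obtain ⟨t, ht⟩ := h
  rw [List.append_assoc] at ht
  rcases List.append_eq_append_iff.mp ht with ⟨k, hk1, hk2⟩ | ⟨k, hk1, hk2⟩
  · -- hk1 : p = s ++ k, hk2 : x ++ t = k ++ y
    cases k with
    | nil =>
      simp only [List.append_nil] at hk1
      simp only [List.nil_append] at hk2
      exact ⟨hk1.symm, ⟨t, hk2⟩⟩
    | cons c k' =>
      obtain ⟨xt, hxt⟩ := hx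
      rw [hxt] at hk2
      have hc : c = '/' := by
        have := congrArg List.head? hk2
        simpa using this.symm
      subst hc
      exact absurd (by rw [hk1]; exact List.mem_append_right s List.mem_cons_self) hp
  · -- hk1 : s = p ++ k, hk2 : y = k ++ (x ++ t)
    cases k with
    | nil =>
      simp only [List.append_nil] at hk1
      simp only [List.nil_append] at hk2
      exact ⟨hk1, ⟨t, hk2.symm⟩⟩
    | cons c k' =>
      obtain ⟨yt, hyt⟩ := hy
      rw [hyt] at hk2
      have hc : c = '/' := by
        have := congrArg List.head? hk2
        simpa using this.symm
      subst hc
      exact absurd (by rw [hk1]; exact List.mem_append_right p List.mem_cons_self) hs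

theorem pvP {ss : List (List Char)} : ∀ {fs : List (List Char)},
    (∀ q ∈ ss, q ≠ [] ∧ '/' ∉ q) → (∀ q ∈ fs, q ≠ [] ∧ '/' ∉ q) →
    pvG ss <+: pvG fs → ss <+: fs := by
  induction ss with
  | nil => intro fs _ _ _; exact List.nil_prefix
  | cons q ss' ih =>
    intro fs hss hfs h
    cases fs with
    | nil =>
      exfalso
      rw [pvG_cons, pvG_nil] at h
      have hlen := h.length_le
      have hq : q ≠ [] := (hss q List.mem_cons_self).1
      have h1 : 1 ≤ q.length := by
        cases q with
        | nil => exact absurd rfl hq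
        | cons _ _ => simp
      have h2 := pvG_length_pos ss'
      simp only [List.length_cons, List.length_append, List.length_nil] at hlen
      omega
    | cons p fs' =>
      rw [pvG_cons, pvG_cons] at h
      rw [List.cons_prefix_cons] at h
      obtain ⟨hqp, hrest⟩ := pvQ (hss q List.mem_cons_self).2 (hfs p List.mem_cons_self).2
        (pvG_head ss') (pvG_head fs') h.2
      rw [List.cons_prefix_cons]
      exact ⟨hqp, ih (fun x hx => hss x (List.mem_cons_of_mem q hx))
        (fun x hx => hfs x (List.mem_cons_of_mem p hx)) hrest⟩

theorem pvM {ss fs : List (List Char)}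
    (hss : ∀ q ∈ ss, q ≠ [] ∧ '/' ∉ q) (hfs : ∀ q ∈ fs, q ≠ [] ∧ '/' ∉ q)
    (hne : ss ≠ []) : (pvG ss <:+: pvG fs ↔ ss <:+: fs) := by
  constructor
  · intro h
    induction fs with
    | nil =>
      exfalso
      have h3 := pvG_length3 hss hne
      have hl := h.length_le
      rw [pvG_nil] at hl
      simp only [List.length_cons, List.length_nil] at hl
      omega
    | cons p fs' ihf =>
      obtain ⟨l, r, hlr⟩ := h
      cases l with
      | nil =>
        simp only [List.nil_append] at hlr
        have hpre : pvG ss <+: pvG (p :: fs') := ⟨r, hlr⟩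
        exact (pvP hss hfs hpre).isInfix
      | cons c l' =>
        rw [pvG_cons] at hlr
        simp only [List.cons_append, List.cons.injEq] at hlr
        obtain ⟨hc, hlr⟩ := hlr
        have hfs' : ∀ q ∈ fs', q ≠ [] ∧ '/' ∉ q := fun x hx => hfs x (List.mem_cons_of_mem p hx)
        rw [List.append_assoc] at hlr
        rcases List.append_eq_append_iff.mp hlr with ⟨k, hk1, hk2⟩ | ⟨k, hk1, hk2⟩
        · -- hk1 : p = l' ++ k, hk2 : pvG ss ++ r = k ++ pvG fs'
          cases k with
          | nil =>
            simp only [List.nil_append] at hk2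
            have : pvG ss <:+: pvG fs' := ⟨[], r, by simpa using hk2⟩
            exact List.infix_cons (ihf hfs' this)
          | cons c' k' =>
            obtain ⟨t, hgt⟩ := pvG_head ss
            rw [hgt] at hk2
            have hc' : c' = '/' := by
              have := congrArg List.head? hk2
              simpa using this.symm
            subst hc'
            exact absurd (by rw [hk1]; exact List.mem_append_right l' List.mem_cons_self)
              (hfs p List.mem_cons_self).2
        · -- hk1 : l' = p ++ k, hk2 : pvG fs' = k ++ (pvG ss ++ r)
          have : pvG ss <:+: pvG fs' := ⟨k, r, by rw [hk2, List.append_assoc]⟩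
          exact List.infix_cons (ihf hfs' this)
  · rintro ⟨l, r, rfl⟩
    obtain ⟨t, hgr⟩ := pvG_head r
    have h2 : pvPJ r ++ ['/'] = '/' :: t := hgr
    refine ⟨pvPJ l, t, ?_⟩
    simp only [pvG, pvPJ_append, List.append_assoc]
    rw [h2]
    simp

-- A's loop searches exactly the contiguous windows
theorem pv_aLoop_true (fs ss : List String) (w : Int) (ids : List Int) :
    pvALoop fs ss w ids = true ↔ ∃ idx ∈ ids, PySem.List.slice fs (some idx) (some (idx + w)) = ss := by
  induction ids with
  | nil => simp [pvALoop]
  | cons idx rest ih =>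
    rw [pvALoop]
    by_cases h : PySem.List.slice fs (some idx) (some (idx + w)) = ss
    · simp [h]
    · simp [h, ih]

theorem pv_infix_iff_window {α : Type} (ss fs : List α) :
    ss <:+: fs ↔ ∃ k : Nat, (k : Int) < (fs.length : Int) - (ss.length : Int) + 1 ∧ List.take ss.length (List.drop k fs) = ss := by
  constructor
  · rintro ⟨l, r, rfl⟩
    refine ⟨l.length, ?_, ?_⟩
    · simp only [List.length_append]
      push_cast
      omega
    · rw [List.append_assoc, List.drop_left, List.take_left]
  · rintro ⟨k, _, ht⟩
    have h1 : ss <+: fs.drop k := ht ▸ List.take_prefix _ _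
    exact List.infix_iff_prefix_suffix.mpr ⟨fs.drop k, h1, List.drop_suffix k fs⟩

theorem pv_infix_map_toList (ss fs : List String) :
    ss.map String.toList <:+: fs.map String.toList ↔ ss <:+: fs := by
  constructor
  · rintro ⟨l, r, he⟩
    rw [List.append_assoc] at he
    obtain ⟨l₁, l₂, hfs, hl₁, hl₂⟩ := List.map_eq_append_iff.mp he.symm
    obtain ⟨m₁, m₂, hl₂', hm₁, hm₂⟩ := List.map_eq_append_iff.mp hl₂
    have hinj : Function.Injective String.toList := fun a b hh => String.toList_inj.mp hh
    have hm : m₁ = ss := List.map_injective_iff.mpr hinj (hm₁.trans rfl)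
    exact ⟨l₁, m₂, by rw [hfs, hl₂', hm, List.append_assoc]⟩
  · exact fun h => h.map _

-- per-rule equivalence of the two match tests
theorem pv_wrap_toList (parts : List String) :
    ("/" ++ PySem.Str.join "/" parts ++ "/").toList
      = '/' :: (List.intercalate ['/'] (parts.map String.toList) ++ ['/']) := by
  simp [String.toList_append, PySem.Str.toList_join, PySem.Chars.join,
    show ("/" : String).toList = ['/'] from rfl]

theorem pv_wrap_ne_nil (parts : List String) (h : parts ≠ []) :
    ("/" ++ PySem.Str.join "/" parts ++ "/").toList = pvG (parts.map String.toList) := by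
  rw [pv_wrap_toList, pv_intercalate_g _ (by simpa using h)]

theorem pv_wrap_nil : ("/" ++ PySem.Str.join "/" ([] : List String) ++ "/").toList = ['/', '/'] := by
  rw [pv_wrap_toList]
  simp [List.intercalate]

theorem pv_rule_eq (filepath source : String) :
    pvSourceMatchesFile filepath source
      = ((!(((PySem.Str.split? (PySem.Str.stripChars source "/") "/").getD []).filter (fun p => !(p == ""))).isEmpty)
          && PySem.Str.isIn
              ("/" ++ PySem.Str.join "/" (((PySem.Str.split? (PySem.Str.stripChars source "/") "/").getD []).filter (fun p => !(p == ""))) ++ "/")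
              ("/" ++ PySem.Str.join "/" (((PySem.Str.split? (PySem.Str.replace filepath "\\" "/") "/").getD []).filter (fun p => !(p == ""))) ++ "/")) := by
  have hfsc := pv_parts_toList (PySem.Str.replace filepath "\\" "/")
  have hssc := pv_parts_toList (PySem.Str.stripChars source "/")
  simp only [pvSourceMatchesFile]
  set fsS := ((PySem.Str.split? (PySem.Str.replace filepath "\\" "/") "/").getD []).filter (fun p => !(p == "")) with hfsS
  set ssS := ((PySem.Str.split? (PySem.Str.stripChars source "/") "/").getD []).filter (fun p => !(p == "")) with hssS
  have hfv : ∀ q ∈ fsS.map String.toList, q ≠ [] ∧ '/' ∉ q := by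
    rw [hfsS, hfsc]; exact pv_parts_valid _
  have hsv : ∀ q ∈ ssS.map String.toList, q ≠ [] ∧ '/' ∉ q := by
    rw [hssS, hssc]; exact pv_parts_valid _
  by_cases hss0 : ssS = []
  · simp [hss0]
  · have hssE : ssS.isEmpty = false := by simp [hss0]
    rw [hssE]
    simp only [Bool.or_false, Bool.not_false, Bool.true_and]
    by_cases hfs0 : fsS = []
    · have hfsE : fsS.isEmpty = true := by simp [hfs0]
      rw [hfsE]
      simp only [if_true]
      cases hIn : PySem.Str.isIn ("/" ++ PySem.Str.join "/" ssS ++ "/") ("/" ++ PySem.Str.join "/" fsS ++ "/") with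
      | false => rfl
      | true =>
        exfalso
        have hinf := (PySem.Str.isIn_iff_infix _ _).mp hIn
        rw [pv_wrap_ne_nil ssS hss0, hfs0, pv_wrap_nil] at hinf
        have h3 := pvG_length3 hsv (by simpa using hss0)
        have hle := hinf.length_le
        simp only [List.length_cons, List.length_nil] at hle
        omega
    · have hfsE : fsS.isEmpty = false := by simp [hfs0]
      rw [hfsE]
      simp only [Bool.false_eq_true, if_false]
      rw [Bool.eq_iff_iff, pv_aLoop_true, PySem.Str.isIn_iff_infix]
      rw [pv_wrap_ne_nil ssS hss0, pv_wrap_ne_nil fsS hfs0]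
      rw [pvM hsv hfv (by simpa using hss0)]
      rw [pv_infix_map_toList]
      rw [pv_infix_iff_window]
      constructor
      · rintro ⟨idx, hmem, hsl⟩
        rw [PySem.List.mem_pyRange_one] at hmem
        obtain ⟨h0, hlt⟩ := hmem
        lift idx to Nat using h0 with k
        rw [PySem.List.slice_natCast_add] at hsl
        exact ⟨k, hlt, hsl⟩
      · rintro ⟨k, hk, ht⟩
        refine ⟨(k : Int), ?_, ?_⟩
        · rw [PySem.List.mem_pyRange_one]
          exact ⟨Int.natCast_nonneg k, hk⟩
        · rw [PySem.List.slice_natCast_add]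
          exact ht

theorem pv_top (filepath : String) (rules : List (String × String × String)) :
    pvAGo filepath rules
      = pvBGo ("/" ++ PySem.Str.join "/" (((PySem.Str.split? (PySem.Str.replace filepath "\\" "/") "/").getD []).filter (fun p => !(p == ""))) ++ "/") rules := by
  induction rules with
  | nil => rfl
  | cons r rest ih =>
    obtain ⟨source, b, c⟩ := r
    simp only [pvAGo, pvBGo, pv_rule_eq filepath source]
    split <;> simp_all

theorem source_package_for_file_py_spec : Claim_equal_source_package_for_file_py := by
  intro filepath rules _
  unfold Spec_source_package_for_file_py source_package_for_file_py source_package_for_file_py_alt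
  exact pv_top filepath rules
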